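-- pv_equiv track=rewrite | github.com/cristianriano/encryption_algorithms | kasiski.py | MCDvector
-- ===== SOURCE A (Python) =====
-- def MCDvector(v,m):
-- 	for i in range(m,0,-1):
-- 		flag=True
-- 		for n in v:
-- 			if(n%i==0): continue
-- 			else:
-- 				flag=False
-- 				break
-- 		if(flag): return i
-- ===== SOURCE B (Python) =====
-- def MCDvector(v, m):
--     # Reduce v once to the gcd of its elements (Euclid), then find the
--     # largest i <= m dividing that gcd by one downward scan from min(m, g).
--     g = 0
--     for n in v:
--         a, b = abs(n), g
--         while b:
--             a, b = b, a % b
--         g = a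
--     if m < 1:
--         return None
--     if g == 0:
--         return m
--     i = min(m, g)
--     while g % i != 0:
--         i -= 1
--     return i
-- ===== Notes on version B (the rewrite author's own statement) =====
-- stated objective: alternative
-- what changed: B folds the vector once into its gcd via Euclid's algorithm and then finds the answer by a single downward divisibility scan on that gcd starting at min(m, gcd), instead of testing every candidate i against every element of v.
import Mathlib
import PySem

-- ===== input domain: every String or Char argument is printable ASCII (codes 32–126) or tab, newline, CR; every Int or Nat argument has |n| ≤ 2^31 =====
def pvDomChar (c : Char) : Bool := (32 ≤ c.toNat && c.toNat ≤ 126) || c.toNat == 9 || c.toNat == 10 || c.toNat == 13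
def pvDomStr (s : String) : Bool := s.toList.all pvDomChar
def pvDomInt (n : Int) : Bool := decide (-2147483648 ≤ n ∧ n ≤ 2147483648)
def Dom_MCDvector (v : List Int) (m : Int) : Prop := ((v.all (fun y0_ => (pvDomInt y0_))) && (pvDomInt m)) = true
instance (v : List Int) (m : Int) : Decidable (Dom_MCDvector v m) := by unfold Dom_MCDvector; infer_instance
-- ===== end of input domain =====

-- B replaces A's test of every candidate i against every element of v by one Euclid gcd fold
-- over v followed by a single downward divisor scan from min(m, gcd) (objective: alternative).


-- ===== PORT A =====
-- inner loop: flag stays True iff every n in v has n % i == 0 (break on the first failure)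
def pvAllDiv (v : List Int) (i : Int) : Bool :=
  match v with
  | [] => true
  | n :: rest => if PySem.Int.mod n i = 0 then pvAllDiv rest i else false

-- outer loop: first i in the countdown list with flag True, else fall off the end (None)
def pvFindA (l : List Int) (v : List Int) : Option Int :=
  match l with
  | [] => none
  | i :: rest => if pvAllDiv v i then some i else pvFindA rest v

def MCDvector (v : List Int) (m : Int) : Option Int :=
  pvFindA (PySem.List.pyRange m 0 (-1)) v

-- ===== PORT B =====
-- Source B's hand-written Euclid loop 'while b: a, b = b, a % b' (on nonnegative values, Nat % = Python %)
def pvEuclid (a b : Nat) : Nat :=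
  if h : b = 0 then a else pvEuclid b (a % b)
termination_by b
decreasing_by exact Nat.mod_lt _ (Nat.pos_of_ne_zero h)

def pvGcdFold (v : List Int) : Nat :=
  v.foldl (fun g n => pvEuclid n.natAbs g) 0

-- Source B's 'while g % i != 0: i -= 1'; the 0 case is a totality guard, never reached
-- from B's call (it starts at min(m, g) ≥ 1, and g % 1 = 0 stops the loop).
def pvScan (g : Nat) (i : Nat) : Nat :=
  match i with
  | 0 => 0
  | j + 1 => if g % (j + 1) ≠ 0 then pvScan g j else j + 1

-- values here are nonnegative, so the min/scan state is kept in Nat (same values as Source B's ints)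
def MCDvector_alt (v : List Int) (m : Int) : Option Int :=
  let g := pvGcdFold v
  if m < 1 then none
  else if g = 0 then some m
  else some ((pvScan g (min m.toNat g) : Nat) : Int)

-- ===== PRECONDITION & SPEC =====
def Spec_MCDvector (v : List Int) (m : Int) (out : Option Int) : Prop := out = MCDvector_alt v m
instance (v : List Int) (m : Int) (out : Option Int) : Decidable (Spec_MCDvector v m out) := by unfold Spec_MCDvector; infer_instance

-- ===== CLAIM (what is proved, stated in full; the proofs are below) =====
def Claim_equal_MCDvector : Prop := ∀ (v : List Int) (m : Int), Dom_MCDvector v m → Spec_MCDvector v m (MCDvector v m)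

-- ===== LEMMAS AND PROOFS =====

lemma pvEuclid_eq_gcd (a b : Nat) : pvEuclid a b = Nat.gcd b a := by
  induction b using Nat.strong_induction_on generalizing a with
  | _ b ih =>
    rw [pvEuclid]
    by_cases h : b = 0
    · simp [h]
    · rw [dif_neg h, ih (a % b) (Nat.mod_lt _ (Nat.pos_of_ne_zero h)) b]
      exact (Nat.gcd_rec b a).symm

lemma pvGcdFold_eq (v : List Int) :
    pvGcdFold v = v.foldl (fun g n => Nat.gcd n.natAbs g) 0 := by
  simp [pvGcdFold, pvEuclid_eq_gcd, Nat.gcd_comm]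

lemma dvd_gcdfold (k : Nat) (v : List Int) : ∀ acc : Nat,
    (k ∣ v.foldl (fun g n => Nat.gcd n.natAbs g) acc ↔ (k ∣ acc ∧ ∀ n ∈ v, k ∣ n.natAbs)) := by
  induction v with
  | nil => simp
  | cons n t ih =>
    intro acc
    rw [List.foldl_cons, ih, Nat.dvd_gcd_iff]
    simp only [List.forall_mem_cons]
    tauto

lemma allDiv_forall (v : List Int) (i : Int) :
    (pvAllDiv v i = true) ↔ ∀ n ∈ v, PySem.Int.mod n i = 0 := by
  induction v with
  | nil => simp [pvAllDiv]
  | cons n t ih =>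
    rw [pvAllDiv]
    by_cases h : PySem.Int.mod n i = 0 <;> simp [h, ih]

lemma pvAllDiv_iff (v : List Int) (k : Nat) :
    (pvAllDiv v ((k : Nat) : Int) = true) ↔ k ∣ pvGcdFold v := by
  rw [allDiv_forall, pvGcdFold_eq, dvd_gcdfold]
  simp [PySem.Int.mod_eq_zero_iff_dvd, ← Int.natAbs_dvd_natAbs]

lemma findA_eq_scan (v : List Int) :
    ∀ j : Nat, 1 ≤ j →
      pvFindA (PySem.List.pyRange (j : Int) 0 (-1)) v = some ((pvScan (pvGcdFold v) j : Nat) : Int) := by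
  intro j hj
  induction j, hj using Nat.le_induction with
  | base =>
    rw [PySem.List.pyRange_neg_one_cons (by norm_num), show ((1:Nat):Int) - 1 = 0 by norm_num,
      PySem.List.pyRange_neg_one_eq_nil (by norm_num)]
    have h1 : pvAllDiv v ((1 : Nat) : Int) = true := (pvAllDiv_iff v 1).mpr (one_dvd _)
    simp only [pvFindA, h1, if_true, pvScan]
    norm_num [Nat.mod_one]
  | succ j hj ih =>
    have hc : (((j + 1 : Nat)) : Int) = (j : Int) + 1 := by push_cast; ring
    rw [hc, PySem.List.pyRange_neg_one_cons (by positivity), show ((j : Int) + 1 - 1) = (j : Int) by ring]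
    by_cases hd : (j + 1) ∣ pvGcdFold v
    · have ha : pvAllDiv v ((j : Int) + 1) = true := by
        have := (pvAllDiv_iff v (j + 1)).mpr hd
        rwa [hc] at this
      simp only [pvFindA, ha, if_true, pvScan]
      rw [if_neg (by simp [Nat.mod_eq_zero_of_dvd hd])]
      rw [hc]
    · have ha : pvAllDiv v ((j : Int) + 1) = false := by
        have := (pvAllDiv_iff v (j + 1)).not
        rw [hc] at this
        simpa using this.mpr hd
      have hm : pvGcdFold v % (j + 1) ≠ 0 := fun h => hd (Nat.dvd_of_mod_eq_zero h)
      simp only [pvFindA, ha, pvScan, if_pos hm]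
      exact ih

lemma pvScan_min (g : Nat) (hg : 1 ≤ g) : ∀ j : Nat, g ≤ j → pvScan g j = pvScan g g := by
  intro j
  induction j with
  | zero => intro h; exact absurd h (by omega)
  | succ j ihj =>
    intro h
    by_cases he : g = j + 1
    · rw [he]
    · rw [pvScan, if_pos (by rw [Nat.mod_eq_of_lt (by omega)]; omega)]
      exact ihj (by omega)

-- ===== VERDICT (by name: the statement is the Claim_ definition above) =====
theorem MCDvector_spec : Claim_equal_MCDvector := by
  intro v m _
  show MCDvector v m = MCDvector_alt v m
  simp only [MCDvector, MCDvector_alt]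
  by_cases hm : m < 1
  · rw [if_pos hm, PySem.List.pyRange_neg_one_eq_nil (by omega)]
    rfl
  · rw [if_neg hm]
    have hm1 : 1 ≤ m.toNat := by omega
    have hmc : ((m.toNat : Nat) : Int) = m := Int.toNat_of_nonneg (by omega)
    have key := findA_eq_scan v m.toNat hm1
    rw [hmc] at key
    rw [key]
    by_cases hz : pvGcdFold v = 0
    · rw [if_pos hz, hz]
      obtain ⟨j, hj⟩ : ∃ j, m.toNat = j + 1 := ⟨m.toNat - 1, by omega⟩
      rw [hj, pvScan, if_neg (by simp), ← hj, hmc]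
    · rw [if_neg hz]
      rcases Nat.le_total m.toNat (pvGcdFold v) with h | h
      · rw [min_eq_left h]
      · rw [min_eq_right h, pvScan_min (pvGcdFold v) (by omega) m.toNat h]
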